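-- pv_equiv track=rewrite | github.com/Amuniare/vitality_system_rulebook | src/transcriber/core/chunking_engine.py | _find_merge_point
-- ===== SOURCE A (Python) =====
-- def _find_merge_point(existing_content: str, new_chunk: str) -> int:
--     """Find the best point to merge two chunks by detecting overlap"""
--     existing_lines = existing_content.split('\n')
--     new_lines = new_chunk.split('\n')
--
--     # Look for matching lines in the last part of existing content
--     # and the first part of new chunk
--     search_range = min(20, len(existing_lines), len(new_lines))
--
--     for i in range(search_range):
--         for j in range(search_range):
--             if (existing_lines[-(i+1)].strip() == new_lines[j].strip() and
--                 len(existing_lines[-(i+1)].strip()) > 10):  # Meaningful line length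
--                 return j + 1  # Return position after the match
--
--     return 0  # No overlap found
-- ===== SOURCE B (Python) =====
-- def _find_merge_point(existing_content: str, new_chunk: str) -> int:
--     """Find the best point to merge two chunks by detecting overlap"""
--     existing_lines = existing_content.split('\n')
--     new_lines = new_chunk.split('\n')
--
--     search_range = min(20, len(existing_lines), len(new_lines))
--
--     # Stage 1: index the meaningful stripped lines of the EXISTING tail,
--     # keyed by text, keeping the distance-from-the-end of the nearest (first) one.
--     nearest = {}
--     for i in range(search_range):
--         s = existing_lines[-(i + 1)].strip()
--         if len(s) > 10 and s not in nearest: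
--             nearest[s] = i
--
--     # Stage 2: one pass over the new lines with a running-minimum accumulator:
--     # the best candidate is the (distance, position) pair minimal in tuple order,
--     # which is exactly the pair A's nested scan would hit first.
--     best = None
--     for j in range(search_range):
--         s = new_lines[j].strip()
--         i = nearest.get(s)
--         if i is not None:
--             cand = (i, j)
--             if best is None or cand < best:
--                 best = cand
--
--     return best[1] + 1 if best is not None else 0
-- ===== Notes on version B (the rewrite author's own statement) =====
-- stated objective: alternative
-- what changed: Replaces A's nested early-return scan (outer over the existing tail, inner rescanning the new lines) by a two-stage selection: index the meaningful stripped existing tail lines by text with their nearest distance-from-the-end, then a single accumulator pass over the new lines keeping the running lexicographic minimum (distance, position) candidate; the answer is the minimum's position + 1.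
import Mathlib
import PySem

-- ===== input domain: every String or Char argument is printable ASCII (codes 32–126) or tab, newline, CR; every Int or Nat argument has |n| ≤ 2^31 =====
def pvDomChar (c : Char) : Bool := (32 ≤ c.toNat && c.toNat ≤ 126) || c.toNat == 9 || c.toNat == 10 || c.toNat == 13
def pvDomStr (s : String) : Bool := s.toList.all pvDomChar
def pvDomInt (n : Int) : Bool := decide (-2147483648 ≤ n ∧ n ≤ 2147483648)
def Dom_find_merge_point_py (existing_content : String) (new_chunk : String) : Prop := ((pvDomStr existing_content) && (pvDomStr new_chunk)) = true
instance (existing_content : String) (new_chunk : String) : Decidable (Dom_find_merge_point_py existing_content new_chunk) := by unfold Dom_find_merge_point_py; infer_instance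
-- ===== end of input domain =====

-- B replaces A's nested early-return scan by a two-stage selection: an index of the
-- meaningful stripped existing tail lines (text -> nearest distance from the end),
-- then one accumulator pass over the new lines keeping the running lexicographic
-- minimum (distance, position) candidate (objective: alternative decomposition).

-- ===== PORT A =====
-- inner 'for j in range(search_range)' loop with early return
def pvAInner (s : String) (nl : List String) (js : List Int) : Option Int :=
  match js with
  | [] => none
  | j :: rest =>
    if s = PySem.Str.strip ((PySem.List.pyGet? nl j).getD "") ∧ 10 < PySem.Str.len s
    then some (j + 1) else pvAInner s nl rest

-- outer 'for i in range(search_range)' loop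
def pvAOuter (el nl : List String) (sr : Nat) (is_ : List Int) : Int :=
  match is_ with
  | [] => 0
  | i :: rest =>
    let s := PySem.Str.strip ((PySem.List.pyGet? el (-(i + 1))).getD "")
    match pvAInner s nl (PySem.List.pyRange 0 (sr : Int) 1) with
    | some r => r
    | none => pvAOuter el nl sr rest

def find_merge_point_py (existing_content : String) (new_chunk : String) : Int :=
  let el := (PySem.Str.split? existing_content "\n").getD []
  let nl := (PySem.Str.split? new_chunk "\n").getD []
  let sr := min 20 (min el.length nl.length)
  pvAOuter el nl sr (PySem.List.pyRange 0 (sr : Int) 1)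

-- ===== PORT B =====
-- stage 1: 'for i in range(search_range): s = existing_lines[-(i+1)].strip();
--           if len(s) > 10 and s not in nearest: nearest[s] = i'
def pvBBuild (el : List String) (is_ : List Int) (d : PySem.Dict String Int) : PySem.Dict String Int :=
  match is_ with
  | [] => d
  | i :: rest =>
    let s := PySem.Str.strip ((PySem.List.pyGet? el (-(i + 1))).getD "")
    pvBBuild el rest (if 10 < PySem.Str.len s ∧ ¬ d.contains s then d.insert s i else d)

-- Python tuple '<' on (int, int)
def pvLexLt (p q : Int × Int) : Bool := p.1 < q.1 || (p.1 == q.1 && p.2 < q.2)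

-- stage 2: 'for j in range(search_range): … if best is None or cand < best: best = cand'
def pvBBest (nl : List String) (d : PySem.Dict String Int) (js : List Int)
    (best : Option (Int × Int)) : Option (Int × Int) :=
  match js with
  | [] => best
  | j :: rest =>
    let s := PySem.Str.strip ((PySem.List.pyGet? nl j).getD "")
    match d.get? s with
    | some i =>
        pvBBest nl d rest (match best with
          | none => some (i, j)
          | some b => if pvLexLt (i, j) b then some (i, j) else some b)
    | none => pvBBest nl d rest best

def find_merge_point_py_alt (existing_content : String) (new_chunk : String) : Int :=
  let el := (PySem.Str.split? existing_content "\n").getD []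
  let nl := (PySem.Str.split? new_chunk "\n").getD []
  let sr := min 20 (min el.length nl.length)
  let nearest := pvBBuild el (PySem.List.pyRange 0 (sr : Int) 1) PySem.Dict.empty
  match pvBBest nl nearest (PySem.List.pyRange 0 (sr : Int) 1) none with
  | some b => b.2 + 1
  | none => 0

-- ===== PRECONDITION & SPEC =====
def Spec_find_merge_point_py (existing_content : String) (new_chunk : String) (out : Int) : Prop := out = find_merge_point_py_alt existing_content new_chunk
instance (existing_content : String) (new_chunk : String) (out : Int) : Decidable (Spec_find_merge_point_py existing_content new_chunk out) := by unfold Spec_find_merge_point_py; infer_instance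

-- ===== CLAIM (what is proved, stated in full; the proofs are below) =====
def Claim_equal_find_merge_point_py : Prop := ∀ (existing_content : String) (new_chunk : String), Dom_find_merge_point_py existing_content new_chunk → Spec_find_merge_point_py existing_content new_chunk (find_merge_point_py existing_content new_chunk)

-- ===== LEMMAS AND PROOFS =====

-- stripped line i from the end of the existing lines / stripped new line j
def pvS (el : List String) (i : Nat) : String :=
  PySem.Str.strip ((PySem.List.pyGet? el (-((i : Int) + 1))).getD "")
def pvT (nl : List String) (j : Nat) : String :=
  PySem.Str.strip ((PySem.List.pyGet? nl (j : Int)).getD "")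

-- A's match condition at pair (i, j)
def pvGood (el nl : List String) (i j : Nat) : Bool :=
  (pvS el i == pvT nl j) && decide (10 < PySem.Str.len (pvS el i))

-- B's dict predicate for key s at index i
def pvKey (el : List String) (s : String) (i : Nat) : Bool :=
  (pvS el i == s) && decide (10 < PySem.Str.len (pvS el i))

-- result of A's inner loop for row i, in closed form
def pvRow (el nl : List String) (sr : Nat) (i : Nat) : Option Int :=
  if 10 < PySem.Str.len (pvS el i) then
    ((List.range' 0 sr).find? (fun j => pvT nl j == pvS el i)).map (fun j : Nat => ((j : Int) + 1))
  else none

-- the non-strict lexicographic order used in the argmin argument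
def pvLe (p q : Int × Int) : Prop := p.1 < q.1 ∨ (p.1 = q.1 ∧ p.2 ≤ q.2)

-- B's running-minimum step, abstracted
def pvStep (b : Option (Int × Int)) (c : Int × Int) : Option (Int × Int) :=
  match b with
  | none => some c
  | some x => if pvLexLt c x then some c else some x

-- ---- generic facts about find? / findSome? on an index range ----

theorem pv_find?_range'_none (p : Nat → Bool) :
    ∀ (m a : Nat), (List.range' a m).find? p = none ↔ ∀ k, a ≤ k → k < a + m → p k = false := by
  intro m
  induction m with
  | zero =>
    intro a
    constructor
    · intro _ k h1 h2; omega
    · intro _; simp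
  | succ m ih =>
    intro a
    rw [List.range'_succ, List.find?_cons]
    by_cases hp : p a
    · simp only [hp]
      constructor
      · intro h; cases h
      · intro h; exact absurd (h a le_rfl (by omega)) (by simp [hp])
    · have hpf : p a = false := by simpa using hp
      rw [hpf]
      simp only []
      rw [ih (a+1)]
      constructor
      · intro h k hk1 hk2
        rcases Nat.eq_or_lt_of_le hk1 with rfl | hlt
        · exact hpf
        · exact h k hlt (by omega)
      · intro h k hk1 hk2; exact h k (by omega) (by omega)

theorem pv_find?_range'_some (p : Nat → Bool) :
    ∀ (m a i : Nat), (List.range' a m).find? p = some i →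
      a ≤ i ∧ i < a + m ∧ p i = true ∧ ∀ k, a ≤ k → k < i → p k = false := by
  intro m
  induction m with
  | zero => intro a i h; simp at h
  | succ m ih =>
    intro a i h
    rw [List.range'_succ, List.find?_cons] at h
    by_cases hp : p a
    · rw [hp] at h
      cases h
      exact ⟨le_rfl, by omega, hp, fun k hk1 hk2 => by omega⟩
    · have hpf : p a = false := by simpa using hp
      rw [hpf] at h
      obtain ⟨h1, h2, h3, h4⟩ := ih (a+1) i h
      refine ⟨by omega, by omega, h3, fun k hk1 hk2 => ?_⟩
      rcases Nat.eq_or_lt_of_le hk1 with rfl | hlt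
      · exact hpf
      · exact h4 k hlt hk2

theorem pv_find?_range'_intro (p : Nat → Bool) :
    ∀ (m a i : Nat), a ≤ i → i < a + m → p i = true → (∀ k, a ≤ k → k < i → p k = false) →
      (List.range' a m).find? p = some i := by
  intro m
  induction m with
  | zero => intro a i h1 h2; omega
  | succ m ih =>
    intro a i h1 h2 h3 h4
    rw [List.range'_succ, List.find?_cons]
    rcases Nat.eq_or_lt_of_le h1 with rfl | hlt
    · rw [h3]
    · rw [h4 a le_rfl hlt]
      exact ih (a+1) i hlt (by omega) h3 (fun k hk1 hk2 => h4 k (by omega) hk2)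

theorem pv_findSome?_range'_none {β : Type} (f : Nat → Option β) :
    ∀ (m a : Nat), (List.range' a m).findSome? f = none ↔ ∀ k, a ≤ k → k < a + m → f k = none := by
  intro m
  induction m with
  | zero =>
    intro a
    constructor
    · intro _ k h1 h2; omega
    · intro _; simp
  | succ m ih =>
    intro a
    rw [List.range'_succ, List.findSome?_cons]
    cases hf : f a with
    | some r =>
      constructor
      · intro h; cases h
      · intro h; exact absurd (h a le_rfl (by omega)) (by simp [hf])
    | none =>
      rw [ih (a+1)]
      constructor
      · intro h k hk1 hk2
        rcases Nat.eq_or_lt_of_le hk1 with rfl | hlt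
        · exact hf
        · exact h k hlt (by omega)
      · intro h k hk1 hk2; exact h k (by omega) (by omega)

theorem pv_findSome?_range'_some {β : Type} (f : Nat → Option β) :
    ∀ (m a : Nat) (r : β), (List.range' a m).findSome? f = some r →
      ∃ i, a ≤ i ∧ i < a + m ∧ f i = some r ∧ ∀ k, a ≤ k → k < i → f k = none := by
  intro m
  induction m with
  | zero => intro a r h; simp at h
  | succ m ih =>
    intro a r h
    rw [List.range'_succ, List.findSome?_cons] at h
    cases hf : f a with
    | some v =>
      rw [hf] at h; cases h
      exact ⟨a, le_rfl, by omega, hf, fun k hk1 hk2 => by omega⟩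
    | none =>
      rw [hf] at h
      obtain ⟨i, h1, h2, h3, h4⟩ := ih (a+1) r h
      refine ⟨i, by omega, by omega, h3, fun k hk1 hk2 => ?_⟩
      rcases Nat.eq_or_lt_of_le hk1 with rfl | hlt
      · exact hf
      · exact h4 k hlt hk2

-- ---- characterization of A's loops ----

theorem pvAInner_char (nl : List String) (s : String) :
    ∀ (m a : Nat), pvAInner s nl (PySem.List.pyRange (a : Int) ((a + m : Nat) : Int) 1) =
      if 10 < PySem.Str.len s then
        ((List.range' a m).find? (fun j => pvT nl j == s)).map (fun j : Nat => ((j : Int) + 1))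
      else none := by
  intro m
  induction m with
  | zero =>
    intro a
    rw [PySem.List.pyRange_one_eq_nil (by push_cast; omega)]
    simp only [pvAInner, List.range'_zero, List.find?_nil, Option.map_none]
    split <;> rfl
  | succ m ih =>
    intro a
    have hlt : ((a : Int)) < ((a + (m + 1) : Nat) : Int) := by push_cast; omega
    rw [PySem.List.pyRange_one_cons hlt]
    show (if s = pvT nl a ∧ 10 < PySem.Str.len s
          then some ((a : Int) + 1)
          else pvAInner s nl (PySem.List.pyRange ((a : Int) + 1) ((a + (m + 1) : Nat) : Int) 1)) = _
    have hstep : ((a : Int) + 1) = (((a + 1 : Nat)) : Int) := by push_cast; ring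
    have hcast : (((a + 1) + m : Nat) : Int) = ((a + (m + 1) : Nat) : Int) := by push_cast; ring
    have ih' := ih (a + 1)
    rw [hcast] at ih'
    rw [List.range'_succ, List.find?_cons]
    by_cases h10 : 10 < PySem.Str.len s
    · by_cases hp : pvT nl a = s
      · have hpb : (pvT nl a == s) = true := beq_iff_eq.mpr hp
        rw [if_pos ⟨hp.symm, h10⟩, if_pos h10, hpb]
        rfl
      · have hpb : (pvT nl a == s) = false := beq_eq_false_iff_ne.mpr hp
        have hne : ¬ (s = pvT nl a ∧ 10 < PySem.Str.len s) := fun h => hp h.1.symm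
        rw [if_neg hne, hstep, ih', if_pos h10, if_pos h10, hpb]
    · have hne : ¬ (s = pvT nl a ∧ 10 < PySem.Str.len s) := fun h => h10 h.2
      rw [if_neg hne, hstep, ih', if_neg h10, if_neg h10]

theorem pvAOuter_char (el nl : List String) (sr : Nat) :
    ∀ (m a : Nat), pvAOuter el nl sr (PySem.List.pyRange (a : Int) ((a + m : Nat) : Int) 1) =
      ((List.range' a m).findSome? (pvRow el nl sr)).getD 0 := by
  intro m
  induction m with
  | zero =>
    intro a
    rw [PySem.List.pyRange_one_eq_nil (by push_cast; omega)]
    simp [pvAOuter]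
  | succ m ih =>
    intro a
    have hlt : ((a : Int)) < ((a + (m + 1) : Nat) : Int) := by push_cast; omega
    rw [PySem.List.pyRange_one_cons hlt]
    show (match pvAInner (pvS el a) nl (PySem.List.pyRange 0 (sr : Int) 1) with
          | some r => r
          | none => pvAOuter el nl sr (PySem.List.pyRange ((a : Int) + 1) ((a + (m + 1) : Nat) : Int) 1)) = _
    have hinner := pvAInner_char nl (pvS el a) sr 0
    simp only [Nat.cast_zero, Nat.zero_add] at hinner
    have hrow : pvAInner (pvS el a) nl (PySem.List.pyRange 0 (sr : Int) 1) = pvRow el nl sr a := by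
      rw [hinner]; rfl
    rw [hrow, List.range'_succ, List.findSome?_cons]
    have hstep : ((a : Int) + 1) = (((a + 1 : Nat)) : Int) := by push_cast; ring
    have hcast : (((a + 1) + m : Nat) : Int) = ((a + (m + 1) : Nat) : Int) := by push_cast; ring
    have ih' := ih (a + 1)
    rw [hcast] at ih'
    cases hr : pvRow el nl sr a with
    | some r => rfl
    | none => rw [hstep, ih']

-- ---- characterization of B's dict ----

theorem pvBBuild_char (el : List String) (s : String) :
    ∀ (m a : Nat) (d : PySem.Dict String Int),
      (pvBBuild el (PySem.List.pyRange (a : Int) ((a + m : Nat) : Int) 1) d).get? s =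
        (d.get? s).or (((List.range' a m).find? (pvKey el s)).map (fun i : Nat => (i : Int))) := by
  intro m
  induction m with
  | zero =>
    intro a d
    rw [PySem.List.pyRange_one_eq_nil (by push_cast; omega)]
    simp [pvBBuild]
  | succ m ih =>
    intro a d
    have hlt : ((a : Int)) < ((a + (m + 1) : Nat) : Int) := by push_cast; omega
    rw [PySem.List.pyRange_one_cons hlt]
    show (pvBBuild el (PySem.List.pyRange ((a : Int) + 1) ((a + (m + 1) : Nat) : Int) 1)
            (if 10 < PySem.Str.len (pvS el a) ∧ ¬ d.contains (pvS el a)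
             then d.insert (pvS el a) ((a : Int)) else d)).get? s = _
    have hstep : ((a : Int) + 1) = (((a + 1 : Nat)) : Int) := by push_cast; ring
    have hcast : (((a + 1) + m : Nat) : Int) = ((a + (m + 1) : Nat) : Int) := by push_cast; ring
    have ih' := ih (a + 1)
    rw [hcast] at ih'
    rw [hstep, ih']
    rw [List.range'_succ, List.find?_cons]
    by_cases hk : pvKey el s a = true
    · have hk' := hk
      unfold pvKey at hk'
      rw [Bool.and_eq_true] at hk'
      have hs : pvS el a = s := beq_iff_eq.mp hk'.1
      have hlen : 10 < PySem.Str.len (pvS el a) := of_decide_eq_true hk'.2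
      simp only [hk]
      by_cases hc : d.contains s = true
      · rw [if_neg (by rw [hs]; exact fun h => h.2 hc)]
        cases hg : d.get? s with
        | none =>
          have hsome : (d.get? s).isSome = true := by
            rw [← PySem.Dict.contains_eq_isSome_get?]; exact hc
          rw [hg] at hsome; cases hsome
        | some v => simp
      · have hcf : d.contains (pvS el a) = false := by
          rw [hs]
          cases hcb : d.contains s with
          | false => rfl
          | true => exact absurd hcb hc
        rw [if_pos ⟨hlen, by rw [hcf]; exact Bool.false_ne_true⟩, hs]
        have hgn : d.get? s = none := by
          have hco := PySem.Dict.contains_eq_isSome_get? d s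
          rw [hs] at hcf
          rw [hcf] at hco
          exact Option.not_isSome_iff_eq_none.mp (by rw [← hco]; simp)
        rw [PySem.Dict.get?_insert_self, hgn]
        simp
    · have hkf : pvKey el s a = false := by
        cases hkb : pvKey el s a with
        | false => rfl
        | true => exact absurd hkb hk
      simp only [hkf]
      by_cases hg : 10 < PySem.Str.len (pvS el a) ∧ ¬ d.contains (pvS el a)
      · have hne : s ≠ pvS el a := by
          intro h
          apply hk
          have h10' : 10 < PySem.Str.len s := by rw [h]; exact hg.1
          unfold pvKey
          rw [← h]
          simp only [beq_self_eq_true, Bool.true_and]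
          exact decide_eq_true h10'
        rw [if_pos hg, PySem.Dict.get?_insert_of_ne _ _ hne]
      · rw [if_neg hg]

-- ---- characterization of B's running-minimum pass ----

theorem pvBBest_char (nl : List String) (d : PySem.Dict String Int) :
    ∀ (m a : Nat) (b : Option (Int × Int)),
      pvBBest nl d (PySem.List.pyRange (a : Int) ((a + m : Nat) : Int) 1) b =
        ((List.range' a m).filterMap
          (fun j => (d.get? (pvT nl j)).map (fun i => (i, (j : Int))))).foldl pvStep b := by
  intro m
  induction m with
  | zero =>
    intro a b
    rw [PySem.List.pyRange_one_eq_nil (by push_cast; omega)]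
    simp [pvBBest]
  | succ m ih =>
    intro a b
    have hlt : ((a : Int)) < ((a + (m + 1) : Nat) : Int) := by push_cast; omega
    rw [PySem.List.pyRange_one_cons hlt]
    show (match d.get? (pvT nl a) with
          | some i =>
              pvBBest nl d (PySem.List.pyRange ((a : Int) + 1) ((a + (m + 1) : Nat) : Int) 1)
                (pvStep b (i, (a : Int)))
          | none => pvBBest nl d (PySem.List.pyRange ((a : Int) + 1) ((a + (m + 1) : Nat) : Int) 1) b) = _
    have hstep : ((a : Int) + 1) = (((a + 1 : Nat)) : Int) := by push_cast; ring
    have hcast : (((a + 1) + m : Nat) : Int) = ((a + (m + 1) : Nat) : Int) := by push_cast; ring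
    have ih' := ih (a + 1)
    rw [hcast] at ih'
    rw [List.range'_succ, List.filterMap_cons]
    cases hg : d.get? (pvT nl a) with
    | some i =>
      simp only [Option.map_some]
      rw [hstep, ih', List.foldl_cons]
    | none =>
      simp only [Option.map_none]
      rw [hstep, ih']

-- ---- the lexicographic order ----

theorem pvLe_refl (p : Int × Int) : pvLe p p := Or.inr ⟨rfl, le_refl _⟩

theorem pvLe_trans {p q r : Int × Int} (h1 : pvLe p q) (h2 : pvLe q r) : pvLe p r := by
  unfold pvLe at *
  rcases h1 with h1 | ⟨h1a, h1b⟩ <;> rcases h2 with h2 | ⟨h2a, h2b⟩ <;> [left; left; left; right] <;> omega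

theorem pvLe_antisymm {p q : Int × Int} (h1 : pvLe p q) (h2 : pvLe q p) : p = q := by
  unfold pvLe at *
  have hp1 : p.1 = q.1 ∧ p.2 = q.2 := by omega
  exact Prod.ext hp1.1 hp1.2

theorem pvLexLt_true {c x : Int × Int} (h : pvLexLt c x = true) : pvLe c x := by
  simp [pvLexLt] at h
  unfold pvLe
  omega

theorem pvLexLt_false {c x : Int × Int} (h : pvLexLt c x = false) : pvLe x c := by
  simp [pvLexLt] at h
  unfold pvLe
  omega

-- ---- folding pvStep computes a lower bound that is attained ----

theorem pvFold_min :
    ∀ (L : List (Int × Int)) (x : Int × Int),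
      ∃ y, L.foldl pvStep (some x) = some y ∧ (y = x ∨ y ∈ L) ∧ pvLe y x ∧ ∀ q ∈ L, pvLe y q := by
  intro L
  induction L with
  | nil => intro x; exact ⟨x, rfl, Or.inl rfl, pvLe_refl x, by simp⟩
  | cons c L ih =>
    intro x
    by_cases hcx : pvLexLt c x = true
    · rcases ih c with ⟨y, h1, h2, h3, h4⟩
      have hle : pvLe c x := pvLexLt_true hcx
      refine ⟨y, ?_, ?_, ?_, ?_⟩
      · rw [List.foldl_cons]
        show L.foldl pvStep (if pvLexLt c x then some c else some x) = some y
        rw [if_pos hcx]; exact h1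
      · right
        rcases h2 with rfl | h2
        · exact List.mem_cons_self
        · exact List.mem_cons_of_mem _ h2
      · exact pvLe_trans h3 hle
      · intro q hq
        rcases List.mem_cons.mp hq with rfl | hq
        · exact h3
        · exact h4 q hq
    · have hxf : pvLexLt c x = false := by simpa using hcx
      rcases ih x with ⟨y, h1, h2, h3, h4⟩
      have hle : pvLe x c := pvLexLt_false hxf
      refine ⟨y, ?_, ?_, ?_, ?_⟩
      · rw [List.foldl_cons]
        show L.foldl pvStep (if pvLexLt c x then some c else some x) = some y
        rw [if_neg (by simp [hxf])]; exact h1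
      · rcases h2 with rfl | h2
        · exact Or.inl rfl
        · exact Or.inr (List.mem_cons_of_mem _ h2)
      · exact h3
      · intro q hq
        rcases List.mem_cons.mp hq with rfl | hq
        · exact pvLe_trans h3 hle
        · exact h4 q hq

-- ---- pvRow in terms of pvGood ----

theorem pvGood_false_of_ne (el nl : List String) (i j : Nat)
    (h : pvT nl j ≠ pvS el i) : pvGood el nl i j = false := by
  unfold pvGood
  rw [beq_eq_false_iff_ne.mpr (fun e => h e.symm), Bool.false_and]

theorem pv_ne_of_pvGood_false (el nl : List String) (i j : Nat)
    (h10 : 10 < PySem.Str.len (pvS el i)) (h : pvGood el nl i j = false) :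
    (pvT nl j == pvS el i) = false := by
  unfold pvGood at h
  cases hbeq : (pvS el i == pvT nl j) with
  | false => exact beq_eq_false_iff_ne.mpr (fun e => (beq_eq_false_iff_ne.mp hbeq) e.symm)
  | true =>
    rw [hbeq, Bool.true_and] at h
    exact absurd h10 (of_decide_eq_false h)

theorem pvRow_none (el nl : List String) (sr i : Nat) :
    pvRow el nl sr i = none ↔ ∀ j, j < sr → pvGood el nl i j = false := by
  unfold pvRow
  by_cases h10 : 10 < PySem.Str.len (pvS el i)
  · rw [if_pos h10]
    rw [Option.map_eq_none_iff, pv_find?_range'_none]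
    constructor
    · intro h j hj
      have hh := h j (by omega) (by omega)
      simp only [beq_eq_false_iff_ne] at hh
      exact pvGood_false_of_ne el nl i j hh
    · intro h j _ hj
      exact pv_ne_of_pvGood_false el nl i j h10 (h j (by omega))
  · rw [if_neg h10]
    constructor
    · intro _ j _
      unfold pvGood
      rw [decide_eq_false h10, Bool.and_false]
    · intro _; rfl

theorem pvRow_some (el nl : List String) (sr i : Nat) (r : Int)
    (h : pvRow el nl sr i = some r) :
    ∃ j, j < sr ∧ pvGood el nl i j = true ∧ r = (j : Int) + 1 ∧
      ∀ j', j' < j → pvGood el nl i j' = false := by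
  unfold pvRow at h
  by_cases h10 : 10 < PySem.Str.len (pvS el i)
  · rw [if_pos h10] at h
    rw [Option.map_eq_some_iff] at h
    obtain ⟨j, hfind, hr⟩ := h
    obtain ⟨_, hj, hpj, hmin⟩ := pv_find?_range'_some _ sr 0 j hfind
    refine ⟨j, by omega, ?_, hr.symm, ?_⟩
    · unfold pvGood
      simp only [beq_iff_eq] at hpj
      rw [beq_iff_eq.mpr hpj.symm, decide_eq_true h10, Bool.true_and]
    · intro j' hj'
      have hh := hmin j' (by omega) hj'
      simp only [beq_eq_false_iff_ne] at hh
      exact pvGood_false_of_ne el nl i j' hh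
  · rw [if_neg h10] at h
    cases h

-- ---- the core equivalence on split lines ----

theorem pv_core (el nl : List String) (sr : Nat) :
    pvAOuter el nl sr (PySem.List.pyRange 0 (sr : Int) 1) =
      (match pvBBest nl (pvBBuild el (PySem.List.pyRange 0 (sr : Int) 1) PySem.Dict.empty)
          (PySem.List.pyRange 0 (sr : Int) 1) none with
        | some b => b.2 + 1
        | none => 0) := by
  have hA := pvAOuter_char el nl sr sr 0
  simp only [Nat.cast_zero, Nat.zero_add] at hA
  set d := pvBBuild el (PySem.List.pyRange 0 (sr : Int) 1) PySem.Dict.empty with hd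
  have hdget : ∀ s, d.get? s = ((List.range' 0 sr).find? (pvKey el s)).map (fun i : Nat => (i : Int)) := by
    intro s
    have h := pvBBuild_char el s sr 0 PySem.Dict.empty
    simp only [Nat.cast_zero, Nat.zero_add, PySem.Dict.get?_empty, Option.none_or] at h
    rw [← hd] at h
    exact h
  have hB := pvBBest_char nl d sr 0 none
  simp only [Nat.cast_zero, Nat.zero_add] at hB
  set cands := (List.range' 0 sr).filterMap
      (fun j => (d.get? (pvT nl j)).map (fun i => (i, (j : Int)))) with hc
  rw [hA, hB]
  have hcand_mem : ∀ q ∈ cands, ∃ i j : Nat, q = ((i : Int), (j : Int)) ∧ j < sr ∧ i < sr ∧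
      pvGood el nl i j = true ∧ ∀ k, k < i → pvGood el nl k j = false := by
    intro q hq
    rw [hc, List.mem_filterMap] at hq
    obtain ⟨j, hjmem, hjeq⟩ := hq
    have hj : j < sr := by
      have := List.mem_range'_1.mp hjmem; omega
    rw [Option.map_eq_some_iff] at hjeq
    obtain ⟨iv, hg, hqe⟩ := hjeq
    rw [hdget, Option.map_eq_some_iff] at hg
    obtain ⟨i, hfind, hiv⟩ := hg
    obtain ⟨_, hi, hpi, hmin⟩ := pv_find?_range'_some _ sr 0 i hfind
    refine ⟨i, j, ?_, hj, by omega, hpi, fun k hk => hmin k (by omega) hk⟩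
    rw [← hqe, ← hiv]
  cases hpx : (List.range' 0 sr).findSome? (pvRow el nl sr) with
  | none =>
    have hnone := (pv_findSome?_range'_none _ sr 0).mp hpx
    have hcnil : cands = [] := by
      rw [hc, List.filterMap_eq_nil_iff]
      intro j hjmem
      have hj : j < sr := by
        have := List.mem_range'_1.mp hjmem; omega
      rw [hdget]
      suffices hfn : (List.range' 0 sr).find? (pvKey el (pvT nl j)) = none by
        rw [hfn]; rfl
      rw [pv_find?_range'_none]
      intro i _ hi
      exact (pvRow_none el nl sr i).mp (hnone i (by omega) hi) j hj
    rw [hcnil]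
    rfl
  | some r =>
    obtain ⟨istar, _, hisr, hrow, hrownone⟩ := pv_findSome?_range'_some _ sr 0 r hpx
    obtain ⟨jstar, hjsr, hgood, hreq, hjmin⟩ := pvRow_some el nl sr istar r hrow
    have himin : ∀ k j, k < istar → j < sr → pvGood el nl k j = false := fun k j hk hj =>
      (pvRow_none el nl sr k).mp (hrownone k (by omega) hk) j hj
    have hpmem : ((istar : Int), (jstar : Int)) ∈ cands := by
      rw [hc, List.mem_filterMap]
      refine ⟨jstar, List.mem_range'_1.mpr ⟨by omega, by omega⟩, ?_⟩
      rw [hdget, pv_find?_range'_intro (pvKey el (pvT nl jstar)) sr 0 istar (by omega) (by omega)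
            hgood (fun k _ hk => himin k jstar hk hjsr)]
      rfl
    have hlb : ∀ q ∈ cands, pvLe ((istar : Int), (jstar : Int)) q := by
      intro q hq
      obtain ⟨i, j, rfl, hj, hi, hg, hmin⟩ := hcand_mem q hq
      have h1 : istar ≤ i := by
        by_contra h
        exact absurd hg (by simp [himin i j (by omega) hj])
      rcases Nat.eq_or_lt_of_le h1 with rfl | hlt2
      · have h2 : jstar ≤ j := by
          by_contra h
          exact absurd hg (by simp [hjmin j (by omega)])
        exact Or.inr ⟨rfl, by simpa using (show (jstar : Int) ≤ (j : Int) by exact_mod_cast h2)⟩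
      · exact Or.inl (by simpa using (show (istar : Int) < (i : Int) by exact_mod_cast hlt2))
    cases hcc : cands with
    | nil => rw [hcc] at hpmem; cases hpmem
    | cons c L =>
      have hstep0 : (c :: L).foldl pvStep none = L.foldl pvStep (some c) := rfl
      rcases pvFold_min L c with ⟨y, h1, h2, h3, h4⟩
      have hymem : y ∈ cands := by
        rw [hcc]
        rcases h2 with rfl | h2
        · exact List.mem_cons_self
        · exact List.mem_cons_of_mem _ h2
      have hylb : ∀ q ∈ cands, pvLe y q := by
        intro q hq
        rw [hcc] at hq
        rcases List.mem_cons.mp hq with rfl | hq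
        · exact h3
        · exact h4 q hq
      have hyeq : y = ((istar : Int), (jstar : Int)) :=
        pvLe_antisymm (hylb _ hpmem) (hlb y hymem)
      rw [hstep0, h1, hyeq, hreq]
      rfl

theorem pv_main (e n : String) : find_merge_point_py e n = find_merge_point_py_alt e n := by
  unfold find_merge_point_py find_merge_point_py_alt
  exact pv_core _ _ _


-- ===== VERDICT (by name: the statement is the Claim_ definition above) =====
theorem find_merge_point_py_spec : Claim_equal_find_merge_point_py := by
  intro e n _
  unfold Spec_find_merge_point_py
  exact pv_main e n
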